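-- pv_equiv track=rewrite | github.com/Luuloneranger/doanAI_canhan | TrinhVanLuu_23110260_Tuan12_BaiTapVeNha_Code/ThuatToan.py | Ktra_matran_khong_trung
-- ===== SOURCE A (Python) =====
-- def Ktra_matran_khong_trung(State):
--     check = []
--     for i in range(3):
--         for j in range(3):
--             if State[i][j] != 0:
--                 if State[i][j] not in check:
--                     check.append(State[i][j])
--                 else:
--                     return False
--     return True
-- ===== SOURCE B (Python) =====
-- def Ktra_matran_khong_trung(State):
--     vals = sorted(State[i][j] for i in range(3) for j in range(3) if State[i][j] != 0)
--     return all(x != y for x, y in zip(vals, vals[1:]))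
-- ===== Notes on version B (the rewrite author's own statement) =====
-- stated objective: alternative
-- what changed: Replaces A's incremental membership-check list with early return by a sort-then-adjacent-scan: collect the non-zero cells, sort them, and check that no two neighbours in the sorted order are equal.
-- outside the precondition, e.g. on Ktra_matran_khong_trung([[1, 1, 1]]): A returns False, B raises IndexError
import Mathlib
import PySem

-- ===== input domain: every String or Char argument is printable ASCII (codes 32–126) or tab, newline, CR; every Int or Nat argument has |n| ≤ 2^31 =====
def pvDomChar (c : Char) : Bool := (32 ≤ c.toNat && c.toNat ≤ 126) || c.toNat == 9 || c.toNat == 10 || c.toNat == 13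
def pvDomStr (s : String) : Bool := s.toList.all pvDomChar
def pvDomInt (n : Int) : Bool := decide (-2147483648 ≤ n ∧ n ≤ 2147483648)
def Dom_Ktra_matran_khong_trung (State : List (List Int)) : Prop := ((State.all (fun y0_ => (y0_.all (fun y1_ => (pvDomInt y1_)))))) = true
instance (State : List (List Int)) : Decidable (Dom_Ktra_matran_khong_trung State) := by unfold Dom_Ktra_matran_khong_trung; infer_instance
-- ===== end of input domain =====

-- B replaces A's incremental membership list with early return by a sort-then-adjacent-scan
-- over the non-zero cells (objective: alternative algorithm, similar cost at this fixed size).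

-- ===== PORT A =====
-- State[i][j], total form; indices are in range on every input admitted by Pre_
def aCell (State : List (List Int)) (i j : Int) : Int :=
  PySem.List.pyGetD (PySem.List.pyGetD State i []) j 0

-- the nested 'for i in range(3): for j in range(3)' with check-list and early return False
def aLoop (State : List (List Int)) : List (Int × Int) → List Int → Bool
  | [], _ => true
  | (i, j) :: rest, check =>
    if aCell State i j ≠ 0 then
      if aCell State i j ∉ check then aLoop State rest (check ++ [aCell State i j])
      else false
    else aLoop State rest check

def Ktra_matran_khong_trung (State : List (List Int)) : Bool :=
  aLoop State
    ((PySem.List.pyRange 0 3 1).flatMap (fun i => (PySem.List.pyRange 0 3 1).map (fun j => (i, j))))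
    []

-- ===== PORT B =====
-- vals = sorted(non-zero cells); all(x != y for x, y in zip(vals, vals[1:]))
def Ktra_matran_khong_trung_alt (State : List (List Int)) : Bool :=
  let vals := PySem.List.sorted
    ((PySem.List.pyRange 0 3 1).flatMap
      (fun i => ((PySem.List.pyRange 0 3 1).map (fun j => aCell State i j)).filter (fun v => v ≠ 0)))
    (fun x => x) false
  (vals.zip (vals.drop 1)).all (fun p => p.1 ≠ p.2)

-- ===== PRECONDITION & SPEC =====
-- Pre_ excludes inputs on which A's State[i][j] raises IndexError (fewer than 3 rows, or one of
-- the first 3 rows shorter than 3) — A still RETURNS False on some such inputs when a duplicate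
-- appears before the out-of-range access (e.g. [[1,1,1]]), but B raises there.
def Pre_Ktra_matran_khong_trung (State : List (List Int)) : Prop :=
  3 ≤ State.length ∧ ∀ row ∈ State.take 3, 3 ≤ row.length
instance (State : List (List Int)) : Decidable (Pre_Ktra_matran_khong_trung State) := by
  unfold Pre_Ktra_matran_khong_trung; infer_instance

def pvWitness_Ktra_matran_khong_trung : List (List Int) := [[1, 2, 3], [4, 5, 6], [7, 8, 0]]

def Spec_Ktra_matran_khong_trung (State : List (List Int)) (out : Bool) : Prop := out = Ktra_matran_khong_trung_alt State
instance (State : List (List Int)) (out : Bool) : Decidable (Spec_Ktra_matran_khong_trung State out) := by unfold Spec_Ktra_matran_khong_trung; infer_instance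

-- ===== CLAIM (what is proved, stated in full; the proofs are below) =====
def Claim_equal_Ktra_matran_khong_trung : Prop := ∀ (State : List (List Int)), Dom_Ktra_matran_khong_trung State → Pre_Ktra_matran_khong_trung State → Spec_Ktra_matran_khong_trung State (Ktra_matran_khong_trung State)

-- ===== LEMMAS AND PROOFS =====

-- A's check-list loop decides Nodup of check followed by the non-zero cells of ps
theorem aLoop_eq (State : List (List Int)) (ps : List (Int × Int)) (check : List Int)
    (h : check.Nodup) :
    aLoop State ps check
      = decide ((check ++ (ps.map (fun p => aCell State p.1 p.2)).filter (fun v => v ≠ 0)).Nodup) := by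
  induction ps generalizing check with
  | nil => simp [aLoop, h]
  | cons p rest ih =>
    obtain ⟨i, j⟩ := p
    by_cases h0 : aCell State i j = 0
    · simp [aLoop, h0, ih check h]
    · by_cases hm : aCell State i j ∈ check
      · have hnot : ∀ (L : List Int), ¬ (check ++ aCell State i j :: L).Nodup := by
          intro L hn
          rw [List.nodup_append] at hn
          exact hn.2.2 (aCell State i j) hm (aCell State i j) (by simp) rfl
        simp [aLoop, h0, hm, hnot]
      · have h' : (check ++ [aCell State i j]).Nodup := by
          rw [List.nodup_append]
          refine ⟨h, List.nodup_singleton _, ?_⟩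
          intro a ha b hb he
          exact hm ((he.trans (List.mem_singleton.mp hb)) ▸ ha)
        simp [aLoop, h0, hm, ih _ h', List.append_assoc]

-- on a ≤-sorted list, the adjacent-pair scan decides Nodup
theorem adj_scan_eq_nodup (s : List Int) (hs : s.Pairwise (· ≤ ·)) :
    ((s.zip (s.drop 1)).all (fun p => p.1 ≠ p.2)) = decide s.Nodup := by
  induction s with
  | nil => simp
  | cons a t ih =>
    cases t with
    | nil => simp
    | cons b u =>
      have hp := List.pairwise_cons.mp hs
      have hab : a ≤ b := hp.1 b (by simp)
      have hbu : ∀ x ∈ u, b ≤ x := (List.pairwise_cons.mp hp.2).1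
      by_cases he : a = b
      · subst he
        simp [List.zip]
      · have hnot : a ∉ b :: u := by
          intro hm
          rcases List.mem_cons.mp hm with h1 | h1
          · exact he h1
          · exact absurd (lt_of_lt_of_le (lt_of_le_of_ne hab he) (hbu a h1)) (lt_irrefl a)
        have ihv := ih hp.2
        simp [List.zip, List.nodup_cons] at ihv ⊢
        simp [he, ihv]
        exact fun _ _ h1 => hnot (List.mem_cons_of_mem _ h1)

-- ===== VERDICT (by name: the statement is the Claim_ definition above) =====
theorem Ktra_matran_khong_trung_spec : Claim_equal_Ktra_matran_khong_trung := by
  intro State _ _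
  unfold Spec_Ktra_matran_khong_trung Ktra_matran_khong_trung Ktra_matran_khong_trung_alt
  have hr : PySem.List.pyRange 0 3 1 = [0, 1, 2] := by decide
  set vals := ((PySem.List.pyRange 0 3 1).flatMap
      (fun i => ((PySem.List.pyRange 0 3 1).map (fun j => aCell State i j)).filter (fun v => v ≠ 0))) with hv
  have hperm : (PySem.List.sorted vals (fun x => x) false).Perm vals :=
    PySem.List.sorted_perm vals (fun x => x) false
  have hd : decide (PySem.List.sorted vals (fun x => x) false).Nodup = decide vals.Nodup :=
    decide_eq_decide.mpr hperm.nodup_iff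
  rw [adj_scan_eq_nodup _ (by simpa using PySem.List.sorted_pairwise (xs := vals) (key := fun x => x)),
      hd, aLoop_eq State _ [] (by simp)]
  simp [hr, hv, aCell, aCell, List.flatMap, ← List.filter_append]
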